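-- pv_equiv track=rewrite | github.com/Teake1404/neg-review | app.py | build_kw_sets
-- ===== SOURCE A (Python) =====
-- from typing import Dict, List, Tuple
--
-- def build_kw_sets(kw_by_profile: Dict[str, List[Dict]]) -> Dict[str, Dict[str, set]]:
--     out = {}
--     for pid, kws in kw_by_profile.items():
--         sets: Dict[str, set] = {"EXACT": set(), "PHRASE": set(), "BROAD": set()}
--         for kw in kws:
--             mt = kw.get("matchType", "").upper()
--             kt = kw.get("keywordText", "").lower().strip()
--             if mt in sets and kt:
--                 sets[mt].add(kt)
--         out[pid] = sets
--     return out
-- ===== SOURCE B (Python) =====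
-- def build_kw_sets(kw_by_profile):
--     return {
--         pid: {label: {kt for kw in kws
--                       if (kt := kw.get("keywordText", "").lower().strip())
--                       and kw.get("matchType", "").upper() == label}
--               for label in ("EXACT", "PHRASE", "BROAD")}
--         for pid, kws in kw_by_profile.items()
--     }
-- ===== Notes on version B (the rewrite author's own statement) =====
-- stated objective: idiomatic
-- what changed: A makes one dispatch pass per profile, mutating a pre-seeded dict of sets keyed by match type; B builds each profile's dict declaratively, with one filtered set-comprehension scan of the keyword list per match-type label.
import Mathlib
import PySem

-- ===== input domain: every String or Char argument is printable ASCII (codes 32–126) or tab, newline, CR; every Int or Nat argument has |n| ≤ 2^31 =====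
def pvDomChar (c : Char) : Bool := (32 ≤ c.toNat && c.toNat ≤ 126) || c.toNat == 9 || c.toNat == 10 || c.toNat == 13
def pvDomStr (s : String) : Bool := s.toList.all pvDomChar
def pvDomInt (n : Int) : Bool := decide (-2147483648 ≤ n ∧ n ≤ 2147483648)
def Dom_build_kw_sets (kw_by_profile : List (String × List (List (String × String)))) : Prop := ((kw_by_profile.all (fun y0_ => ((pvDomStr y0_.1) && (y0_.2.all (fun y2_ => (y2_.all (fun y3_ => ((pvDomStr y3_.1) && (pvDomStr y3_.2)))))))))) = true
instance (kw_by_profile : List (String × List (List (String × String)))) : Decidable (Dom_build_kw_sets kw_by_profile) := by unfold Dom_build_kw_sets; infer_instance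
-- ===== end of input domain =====

-- B replaces A's single dispatch pass (mutating a pre-seeded dict of sets) by a per-label
-- filtered comprehension: same results, a more declarative decomposition (not faster).


-- ===== PORT A =====
-- mt / kt normalisation, shared vocabulary of both ports
def pvMT (kw : List (String × String)) : String :=
  PySem.Str.upper ((PySem.Dict.mk kw).getD "matchType" "")
def pvKT (kw : List (String × String)) : String :=
  PySem.Str.strip (PySem.Str.lower ((PySem.Dict.mk kw).getD "keywordText" ""))

def build_kw_sets (kw_by_profile : List (String × List (List (String × String)))) : List (String × List (String × List String)) :=
  let out := kw_by_profile.foldl (fun (out : PySem.Dict String (PySem.Dict String (PySem.Set String))) pk =>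
      let sets := pk.2.foldl (fun (sets : PySem.Dict String (PySem.Set String)) kw =>
          let mt := pvMT kw
          let kt := pvKT kw
          if sets.contains mt && kt != "" then sets.modify mt PySem.Set.empty (fun s => PySem.Set.add s kt) else sets)
        (PySem.Dict.mk [("EXACT", PySem.Set.empty), ("PHRASE", PySem.Set.empty), ("BROAD", PySem.Set.empty)])
      out.insert pk.1 sets)
    PySem.Dict.empty
  out.items.map (fun p => (p.1, p.2.items))

-- ===== PORT B =====
-- the set comprehension for one label: set(kt for kw in kws if kt and mt == label)
def bSetFor (label : String) (kws : List (List (String × String))) : PySem.Set String :=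
  PySem.Set.ofList (kws.filterMap (fun kw =>
    if pvKT kw != "" && (pvMT kw == label) then some (pvKT kw) else none))

def build_kw_sets_alt (kw_by_profile : List (String × List (List (String × String)))) : List (String × List (String × List String)) :=
  (kw_by_profile.foldl (fun (out : PySem.Dict String (List (String × List String))) pk =>
      out.insert pk.1
        ((["EXACT", "PHRASE", "BROAD"].foldl
            (fun (d : PySem.Dict String (PySem.Set String)) label => d.insert label (bSetFor label pk.2))
            PySem.Dict.empty).items))
    PySem.Dict.empty).items

-- ===== PRECONDITION & SPEC =====
def Spec_build_kw_sets (kw_by_profile : List (String × List (List (String × String)))) (out : List (String × List (String × List String))) : Prop := out = build_kw_sets_alt kw_by_profile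
instance (kw_by_profile : List (String × List (List (String × String)))) (out : List (String × List (String × List String))) : Decidable (Spec_build_kw_sets kw_by_profile out) := by unfold Spec_build_kw_sets; infer_instance

-- ===== CLAIM (what is proved, stated in full; the proofs are below) =====
def Claim_equal_build_kw_sets : Prop := ∀ (kw_by_profile : List (String × List (List (String × String)))), Dom_build_kw_sets kw_by_profile → Spec_build_kw_sets kw_by_profile (build_kw_sets kw_by_profile)

-- ===== LEMMAS AND PROOFS =====

-- the three-key literal dict A's inner loop lives in
def mk3 (a b c : PySem.Set String) : PySem.Dict String (PySem.Set String) :=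
  PySem.Dict.mk [("EXACT", a), ("PHRASE", b), ("BROAD", c)]

-- A-style single-label accumulation
def addSel (L : String) (kws : List (List (String × String))) (s : PySem.Set String) : PySem.Set String :=
  kws.foldl (fun s kw => if pvMT kw == L && pvKT kw != "" then PySem.Set.add s (pvKT kw) else s) s

lemma addSel_cons (L : String) (kw : List (String × String)) (tl : List (List (String × String))) (s : PySem.Set String) :
    addSel L (kw :: tl) s = addSel L tl (if pvMT kw == L && pvKT kw != "" then PySem.Set.add s (pvKT kw) else s) := rfl

lemma step_mk3 (kw : List (String × String)) (a b c : PySem.Set String) :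
    (if (mk3 a b c).contains (pvMT kw) && pvKT kw != "" then (mk3 a b c).modify (pvMT kw) PySem.Set.empty (fun s => PySem.Set.add s (pvKT kw)) else mk3 a b c)
    = mk3 (if pvMT kw == "EXACT" && pvKT kw != "" then PySem.Set.add a (pvKT kw) else a)
          (if pvMT kw == "PHRASE" && pvKT kw != "" then PySem.Set.add b (pvKT kw) else b)
          (if pvMT kw == "BROAD" && pvKT kw != "" then PySem.Set.add c (pvKT kw) else c) := by
  by_cases hk : pvKT kw = ""
  · simp [hk]
  · by_cases hE : pvMT kw = "EXACT"
    · simp [hE, hk, mk3, PySem.Dict.contains, PySem.Dict.modify, PySem.Dict.getD, PySem.Dict.get?, PySem.Dict.insert]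
    · by_cases hP : pvMT kw = "PHRASE"
      · simp [hP, hk, mk3, PySem.Dict.contains, PySem.Dict.modify, PySem.Dict.getD, PySem.Dict.get?, PySem.Dict.insert]
      · by_cases hB : pvMT kw = "BROAD"
        · simp [hB, hk, mk3, PySem.Dict.contains, PySem.Dict.modify, PySem.Dict.getD, PySem.Dict.get?, PySem.Dict.insert]
        · have : (mk3 a b c).contains (pvMT kw) = false := by
            simp [mk3, PySem.Dict.contains]
            exact ⟨fun h => hE h.symm, fun h => hP h.symm, fun h => hB h.symm⟩
          simp [this, hE, hP, hB]

lemma inner_fold_mk3 (kws : List (List (String × String))) :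
    ∀ a b c, kws.foldl (fun (sets : PySem.Dict String (PySem.Set String)) kw =>
        if sets.contains (pvMT kw) && pvKT kw != "" then sets.modify (pvMT kw) PySem.Set.empty (fun s => PySem.Set.add s (pvKT kw)) else sets)
      (mk3 a b c)
    = mk3 (addSel "EXACT" kws a) (addSel "PHRASE" kws b) (addSel "BROAD" kws c) := by
  induction kws with
  | nil => intro a b c; rfl
  | cons kw tl ih =>
    intro a b c
    simp only [List.foldl_cons, step_mk3, ih, addSel_cons]

lemma addSel_foldl (L : String) (kws : List (List (String × String))) :
    ∀ s, addSel L kws s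
    = (kws.filterMap (fun kw => if pvKT kw != "" && (pvMT kw == L) then some (pvKT kw) else none)).foldl PySem.Set.add s := by
  induction kws with
  | nil => intro s; rfl
  | cons kw tl ih =>
    intro s
    rw [addSel_cons]
    by_cases hk : pvKT kw = ""
    · simp [hk, ih]
    · by_cases hm : pvMT kw = L
      · simp [hk, hm, ih]
      · simp [hm, ih]

lemma addSel_eq_bSetFor (L : String) (kws : List (List (String × String))) :
    addSel L kws PySem.Set.empty = bSetFor L kws := by
  rw [bSetFor, addSel_foldl]; rfl

lemma inner_dict_eq (kws : List (List (String × String))) :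
    mk3 (bSetFor "EXACT" kws) (bSetFor "PHRASE" kws) (bSetFor "BROAD" kws)
    = ["EXACT", "PHRASE", "BROAD"].foldl
        (fun (d : PySem.Dict String (PySem.Set String)) label => d.insert label (bSetFor label kws))
        PySem.Dict.empty := by
  simp [mk3, PySem.Dict.insert, PySem.Dict.empty, PySem.Dict.contains]

lemma mapVal_insert (d : PySem.Dict String (PySem.Dict String (PySem.Set String))) (k : String) (v : PySem.Dict String (PySem.Set String)) :
    ((d.insert k v).items.map (fun p => (p.1, p.2.items)))
    = ((PySem.Dict.mk (d.items.map (fun p => (p.1, p.2.items)))).insert k v.items).items := by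
  have hc : (PySem.Dict.mk (d.items.map (fun p => (p.1, p.2.items)))).contains k = d.contains k := by
    simp [PySem.Dict.contains, List.any_map, Function.comp_def]
  rw [PySem.Dict.items_insert, PySem.Dict.items_insert, hc]
  by_cases h : d.contains k = true
  · simp only [h, if_pos, List.map_map]
    apply List.map_congr_left
    intro p _
    by_cases hp : p.1 = k <;> simp [hp]
  · have h' : d.contains k = false := by simpa using h
    simp [h']

lemma outer_fold (l : List (String × List (List (String × String)))) :
    ∀ (d : PySem.Dict String (PySem.Dict String (PySem.Set String))),
    ((l.foldl (fun (out : PySem.Dict String (PySem.Dict String (PySem.Set String))) pk =>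
        let sets := pk.2.foldl (fun (sets : PySem.Dict String (PySem.Set String)) kw =>
            let mt := pvMT kw
            let kt := pvKT kw
            if sets.contains mt && kt != "" then sets.modify mt PySem.Set.empty (fun s => PySem.Set.add s kt) else sets)
          (PySem.Dict.mk [("EXACT", PySem.Set.empty), ("PHRASE", PySem.Set.empty), ("BROAD", PySem.Set.empty)])
        out.insert pk.1 sets) d).items.map (fun p => (p.1, p.2.items)))
    = (l.foldl (fun (out : PySem.Dict String (List (String × List String))) pk =>
        out.insert pk.1
          ((["EXACT", "PHRASE", "BROAD"].foldl
              (fun (dd : PySem.Dict String (PySem.Set String)) label => dd.insert label (bSetFor label pk.2))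
              PySem.Dict.empty).items))
        (PySem.Dict.mk (d.items.map (fun p => (p.1, p.2.items))))).items := by
  induction l with
  | nil => intro d; simp
  | cons pk tl ih =>
    intro d
    simp only [List.foldl_cons]
    have hsets : pk.2.foldl (fun (sets : PySem.Dict String (PySem.Set String)) kw =>
            let mt := pvMT kw
            let kt := pvKT kw
            if sets.contains mt && kt != "" then sets.modify mt PySem.Set.empty (fun s => PySem.Set.add s kt) else sets)
          (PySem.Dict.mk [("EXACT", PySem.Set.empty), ("PHRASE", PySem.Set.empty), ("BROAD", PySem.Set.empty)])
        = ["EXACT", "PHRASE", "BROAD"].foldl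
            (fun (dd : PySem.Dict String (PySem.Set String)) label => dd.insert label (bSetFor label pk.2))
            PySem.Dict.empty := by
      have h1 := inner_fold_mk3 pk.2 PySem.Set.empty PySem.Set.empty PySem.Set.empty
      have : (PySem.Dict.mk [("EXACT", PySem.Set.empty), ("PHRASE", PySem.Set.empty), ("BROAD", PySem.Set.empty)])
           = mk3 PySem.Set.empty PySem.Set.empty PySem.Set.empty := rfl
      rw [this, h1, addSel_eq_bSetFor, addSel_eq_bSetFor, addSel_eq_bSetFor, inner_dict_eq]
    rw [hsets, ih, mapVal_insert]
    rfl

-- ===== VERDICT (by name: the statement is the Claim_ definition above) =====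
theorem build_kw_sets_spec : Claim_equal_build_kw_sets := by
  intro kwp _
  unfold Spec_build_kw_sets build_kw_sets build_kw_sets_alt
  have := outer_fold kwp PySem.Dict.empty
  simpa [PySem.Dict.empty, PySem.Dict.items] using this
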